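-- pv_equiv track=rewrite | github.com/miliar/Code_Jam_Webscraper | solutions_python/Problem_201/769.py | calc
-- ===== SOURCE A (Python) =====
-- def calc(N, K):
--   N -= 1
--   K -= 1
--
--   if K == 0:
--     mindist = N // 2
--     maxdist = N - mindist
--
--     return maxdist, mindist
--
--   else:
--     if N & 1:
--       if K & 1:
--         N_sub = (N // 2) + 1
--         K_sub = (K // 2) + 1
--       else:
--         N_sub = N // 2
--         K_sub = K // 2
--     else:
--       N_sub = N // 2
--       if K & 1:
--         K_sub = (K // 2) + 1
--       else:
--         K_sub = K // 2
--
--     return calc(N_sub, K_sub)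
-- ===== SOURCE B (Python) =====
-- def calc(N, K):
--     # Closed form: the K-th person sits in one of the 2^t equal-depth segments,
--     # where t = floor(log2(K)).  Splitting a gap of size n leaves gaps a, b with
--     # (a+1)+(b+1) = n+1, so at depth t the quantities (gap+1) partition N+1 into
--     # 2^t parts of size q or q+1, the larger ones taken first among that level.
--     t = K.bit_length() - 1
--     q, r = divmod(N + 1, 1 << t)
--     n = (q + 1 if K - (1 << t) < r else q) - 2
--     m = n // 2
--     return n - m, m
-- ===== Notes on version B (the rewrite author's own statement) =====
-- stated objective: alternative
-- what changed: Replaces A's tail recursion that halves (N,K) with parity branches by a closed form: t = floor(log2 K), one divmod of N+1 by 2^t picks the K-th person's gap size directly.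
import Mathlib
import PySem

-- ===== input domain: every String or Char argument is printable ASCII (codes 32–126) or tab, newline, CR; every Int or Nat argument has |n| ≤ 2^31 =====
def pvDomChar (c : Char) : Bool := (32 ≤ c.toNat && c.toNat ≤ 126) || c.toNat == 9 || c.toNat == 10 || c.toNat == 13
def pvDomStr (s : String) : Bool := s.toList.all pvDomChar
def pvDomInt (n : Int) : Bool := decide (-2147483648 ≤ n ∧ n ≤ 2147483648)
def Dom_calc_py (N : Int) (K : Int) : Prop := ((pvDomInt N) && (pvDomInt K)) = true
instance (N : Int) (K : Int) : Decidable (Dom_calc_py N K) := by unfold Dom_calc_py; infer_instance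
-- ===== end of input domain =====

-- B replaces A's tail recursion (halving N and K with parity branches) by a closed form:
-- t = floor(log2 K), one divmod of N+1 by 2^t picks the K-th person's gap size directly.

-- ===== PORT A =====
-- A's tail recursion, guarded by fuel (the fuel only makes it total in Lean; inside
-- Pre_calc_py the fuel K.toNat + 1 always suffices).
def calcAF : Nat → Int → Int → Int × Int
  | 0, _, _ => (0, 0)          -- never reached when 1 ≤ K (fuel guard only)
  | f+1, N0, K0 =>
    let N : Int := N0 - 1      -- N -= 1
    let K : Int := K0 - 1      -- K -= 1
    if K = 0 then
      let mindist := PySem.Int.floordiv N 2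
      (N - mindist, mindist)
    else
      if PySem.Int.band N 1 ≠ 0 then          -- if N & 1:
        if PySem.Int.band K 1 ≠ 0 then        --   if K & 1:
          calcAF f (PySem.Int.floordiv N 2 + 1) (PySem.Int.floordiv K 2 + 1)
        else
          calcAF f (PySem.Int.floordiv N 2) (PySem.Int.floordiv K 2)
      else
        if PySem.Int.band K 1 ≠ 0 then        --   if K & 1:
          calcAF f (PySem.Int.floordiv N 2) (PySem.Int.floordiv K 2 + 1)
        else
          calcAF f (PySem.Int.floordiv N 2) (PySem.Int.floordiv K 2)

def calc_py (N : Int) (K : Int) : Int × Int := calcAF (K.toNat + 1) N K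

-- ===== PORT B =====
-- Source B's closed form.  `K.bit_length() - 1` is ported as Nat.log2 K.natAbs
-- (Python's bit_length is of the absolute value; exact whenever K ≠ 0); `1 << t` is 2^t.
def calc_py_alt (N : Int) (K : Int) : Int × Int :=
  let t : Nat := Nat.log2 K.natAbs                 -- t = K.bit_length() - 1
  let p : Int := 2 ^ t                             -- 1 << t
  let q := PySem.Int.floordiv (N + 1) p            -- q, r = divmod(N + 1, 1 << t)
  let r := PySem.Int.mod (N + 1) p
  let n := (if K - p < r then q + 1 else q) - 2
  let m := PySem.Int.floordiv n 2
  (n - m, m)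

-- ===== PRECONDITION & SPEC =====
-- Pre_ excludes K ≤ 0, where A's recursion never reaches K == 0 and raises RecursionError.
def Pre_calc_py (N : Int) (K : Int) : Prop := 1 ≤ K
instance (N : Int) (K : Int) : Decidable (Pre_calc_py N K) := by unfold Pre_calc_py; infer_instance
def pvWitness_calc_py : Int × Int := (5, 2)

def Spec_calc_py (N : Int) (K : Int) (out : Int × Int) : Prop := out = calc_py_alt N K
instance (N : Int) (K : Int) (out : Int × Int) : Decidable (Spec_calc_py N K out) := by unfold Spec_calc_py; infer_instance

-- ===== CLAIM (what is proved, stated in full; the proofs are below) =====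
def Claim_equal_calc_py : Prop := ∀ (N : Int) (K : Int), Dom_calc_py N K → Pre_calc_py N K → Spec_calc_py N K (calc_py N K)

-- ===== LEMMAS AND PROOFS =====

-- The closed form with the level t made explicit (ediv/emod form of calc_py_alt's body).
def Fc (t : Nat) (N K : Int) : Int × Int :=
  let p : Int := 2 ^ t
  let q := (N + 1) / p
  let r := (N + 1) % p
  let n := (if K - p < r then q + 1 else q) - 2
  let m := n / 2
  (n - m, m)

lemma pv_fd2 (a : Int) : PySem.Int.floordiv a 2 = a / 2 :=
  PySem.Int.floordiv_eq_ediv_of_pos (by omega)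

lemma pv_alt_eq_Fc (N K : Int) : calc_py_alt N K = Fc (Nat.log2 K.natAbs) N K := by
  have h1 : (0:Int) < 2 ^ (Nat.log2 K.natAbs) := by positivity
  simp only [calc_py_alt, Fc, PySem.Int.floordiv_eq_ediv_of_pos h1,
    PySem.Int.mod_eq_emod_of_pos h1, pv_fd2]

-- ediv/emod of a = b*q' + r' with 0 ≤ r' < b.
lemma pv_ediv_eq (a b q' r' : Int) (hb : 0 < b) (h : a = b * q' + r')
    (h0 : 0 ≤ r') (h1 : r' < b) : a / b = q' ∧ a % b = r' := by
  constructor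
  · rw [h, add_comm, Int.add_mul_ediv_left r' q' (by omega), Int.ediv_eq_zero_of_lt h0 h1,
      zero_add]
  · rw [h, add_comm, Int.add_mul_emod_self_left, Int.emod_eq_of_lt h0 h1]

-- The heart: one halving step of A preserves the closed form, one level down.
lemma pv_Fstep (t : Nat) (N0 K0 Ns : Int)
    (hk1 : 2 * 2 ^ t ≤ K0) (hk2 : K0 < 4 * 2 ^ t)
    (hNs : Ns = (N0 - 1) / 2 + ((N0 - 1) % 2) * ((K0 - 1) % 2)) :
    Fc t Ns (K0 / 2) = Fc (t + 1) N0 K0 := by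
  have hh : (0:Int) < 2 ^ t := by positivity
  set h : Int := 2 ^ t with hhdef
  have hp : (2:Int) ^ (t + 1) = 2 * h := by rw [pow_succ]; ring
  set M : Int := N0 + 1 with hM
  have hq := Int.ediv_add_emod M (2 * h)
  set q : Int := M / (2 * h) with hqdef
  set r : Int := M % (2 * h) with hrdef
  have hq2 : 2 * (h * q) + r = M := by rw [← hq]; ring
  have hdist : h * (q + 1) = h * q + h := by ring
  have hr0 : 0 ≤ r := Int.emod_nonneg M (by omega)
  have hr1 : r < 2 * h := Int.emod_lt_of_pos M (by omega)
  -- M' = Ns + 1 expressed by cases on the parities of N0-1 (≡ M) and K0-1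
  rcases Int.emod_two_eq (N0 - 1) with hn | hn <;> rcases Int.emod_two_eq (K0 - 1) with hk | hk
  all_goals simp only [hn, hk, mul_zero, mul_one, add_zero] at hNs
  -- case 1: M odd? N0-1 even → M = N0+1 odd? N0-1 even means N0 odd means M even.
  -- In each case: find X Y with Ns+1 = h*X + Y, 0 ≤ Y < h, rewrite Fc, compare.
  case _ => -- N0-1 even, K0-1 even (K0 odd)
    have ⟨e1, e2⟩ := pv_ediv_eq (Ns + 1) h q (r / 2) hh (by omega) (by omega) (by omega)
    simp only [Fc, ← hhdef, hp, ← hM, ← hqdef, ← hrdef, e1, e2]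
    by_cases hc : K0 - 2 * h < r
    · rw [if_pos (by omega), if_pos hc]
    · rw [if_neg (by omega), if_neg hc]
  case _ => -- N0-1 even, K0-1 odd (K0 even)
    have ⟨e1, e2⟩ := pv_ediv_eq (Ns + 1) h q (r / 2) hh (by omega) (by omega) (by omega)
    simp only [Fc, ← hhdef, hp, ← hM, ← hqdef, ← hrdef, e1, e2]
    by_cases hc : K0 - 2 * h < r
    · rw [if_pos (by omega), if_pos hc]
    · rw [if_neg (by omega), if_neg hc]
  case _ => -- N0-1 odd (M odd, so r odd), K0-1 even (K0 odd)
    have hrodd : r % 2 = 1 := by omega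
    have ⟨e1, e2⟩ := pv_ediv_eq (Ns + 1) h q ((r - 1) / 2) hh (by omega) (by omega) (by omega)
    simp only [Fc, ← hhdef, hp, ← hM, ← hqdef, ← hrdef, e1, e2]
    by_cases hc : K0 - 2 * h < r
    · rw [if_pos (by omega), if_pos hc]
    · rw [if_neg (by omega), if_neg hc]
  case _ => -- N0-1 odd (M odd, r odd), K0-1 odd (K0 even)
    have hrodd : r % 2 = 1 := by omega
    by_cases hr2 : r = 2 * h - 1
    · -- Ns+1 = h*(q+1) + 0; left cond false (s' = q+1), right cond true (s = q+1)
      have ⟨e1, e2⟩ := pv_ediv_eq (Ns + 1) h (q + 1) 0 hh (by omega) (by omega) (by omega)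
      simp only [Fc, ← hhdef, hp, ← hM, ← hqdef, ← hrdef, e1, e2]
      rw [if_neg (by omega), if_pos (by omega)]
    · have ⟨e1, e2⟩ := pv_ediv_eq (Ns + 1) h q ((r + 1) / 2) hh (by omega) (by omega) (by omega)
      simp only [Fc, ← hhdef, hp, ← hM, ← hqdef, ← hrdef, e1, e2]
      by_cases hc : K0 - 2 * h < r
      · rw [if_pos (by omega), if_pos hc]
      · rw [if_neg (by omega), if_neg hc]

lemma pv_main : ∀ (t : Nat) (N0 K0 : Int) (f : Nat),
    2 ^ t ≤ K0 → K0 < 2 ^ (t + 1) → t < f → calcAF f N0 K0 = Fc t N0 K0 := by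
  intro t
  induction t with
  | zero =>
    intro N0 K0 f h1 h2 hf
    obtain ⟨f', rfl⟩ : ∃ g, f = g + 1 := ⟨f - 1, by omega⟩
    have hK : K0 = 1 := by norm_num at h1 h2; omega
    subst hK
    simp only [calcAF, Fc, pv_fd2]
    norm_num
    omega
  | succ t ih =>
    intro N0 K0 f h1 h2 hf
    obtain ⟨f', rfl⟩ : ∃ g, f = g + 1 := ⟨f - 1, by omega⟩
    have hp : (2:Int) ^ (t + 1) = 2 * 2 ^ t := by rw [pow_succ]; ring
    have hp2 : (2:Int) ^ (t + 2) = 4 * 2 ^ t := by rw [pow_succ, pow_succ]; ring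
    have hh : (0:Int) < 2 ^ t := by positivity
    rw [hp] at h1; rw [hp2] at h2
    have hk0 : ¬ (K0 - 1 = 0) := by omega
    simp only [calcAF, pv_fd2, PySem.Int.band_one,
      PySem.Int.mod_eq_emod_of_pos (show (0:Int) < 2 by norm_num), if_neg hk0, ne_eq]
    rcases Int.emod_two_eq (N0 - 1) with hn | hn <;>
      rcases Int.emod_two_eq (K0 - 1) with hk | hk <;>
      simp only [hn, hk] <;> norm_num
    -- four branches; in each, IH then pv_Fstep
    · -- N0-1 even, K0-1 even
      rw [ih _ _ f' (by omega) (by omega) (by omega),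
        show (K0 - 1) / 2 = K0 / 2 by omega]
      exact pv_Fstep t N0 K0 _ h1 h2 (by rw [hn, hk]; norm_num)
    · -- N0-1 even, K0-1 odd
      rw [ih _ _ f' (by omega) (by omega) (by omega),
        show (K0 - 1) / 2 + 1 = K0 / 2 by omega]
      exact pv_Fstep t N0 K0 _ h1 h2 (by rw [hn, hk]; norm_num)
    · -- N0-1 odd, K0-1 even
      rw [ih _ _ f' (by omega) (by omega) (by omega),
        show (K0 - 1) / 2 = K0 / 2 by omega]
      exact pv_Fstep t N0 K0 _ h1 h2 (by rw [hn, hk]; norm_num)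
    · -- N0-1 odd, K0-1 odd
      rw [ih _ _ f' (by omega) (by omega) (by omega),
        show (K0 - 1) / 2 + 1 = K0 / 2 by omega]
      exact pv_Fstep t N0 K0 _ h1 h2 (by rw [hn, hk]; norm_num)

-- ===== VERDICT (by name: the statement is the Claim_ definition above) =====
theorem calc_py_spec : Claim_equal_calc_py := by
  intro N K _ hP
  replace hP : 1 ≤ K := hP
  unfold Spec_calc_py calc_py
  rw [pv_alt_eq_Fc]
  set t : Nat := Nat.log2 K.natAbs with ht
  have hKn : 1 ≤ K.natAbs := by omega
  have hl : 2 ^ t ≤ K.natAbs := Nat.log2_self_le (by omega)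
  have hu : K.natAbs < 2 ^ (t + 1) := Nat.lt_log2_self
  have hK : (K.natAbs : Int) = K := Int.natAbs_of_nonneg (by omega)
  have htf : t < K.toNat + 1 := by
    have := Nat.lt_two_pow_self (n := t)
    omega
  apply pv_main t N K (K.toNat + 1) _ _ htf
  · exact_mod_cast hK ▸ (by exact_mod_cast hl : ((2:Nat) ^ t : Int) ≤ (K.natAbs : Int))
  · exact_mod_cast hK ▸ (by exact_mod_cast hu : ((K.natAbs : Int)) < ((2:Nat) ^ (t+1) : Int))
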